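-- pv_equiv track=rewrite | github.com/wky0422/PlantPTM | codes/Generate_PLM_embeddings.py | reconstruct_full_sequence
-- ===== SOURCE A (Python) =====
-- def reconstruct_full_sequence(sequences_info):
--     longest_seq = max(sequences_info, key=lambda x: len(x['sequence']))['sequence']
--     clean_seq = longest_seq.replace('X', '')
--     if len(sequences_info) > 1:
--         best_seq = ""
--
--         for seq_info in sequences_info:
--             seq = seq_info['sequence']
--             if 'X' not in seq and len(seq) > len(best_seq):
--                 best_seq = seq
--
--         if best_seq:
--             return best_seq
--
--     return clean_seq if clean_seq else longest_seq
-- ===== SOURCE B (Python) =====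
-- def reconstruct_full_sequence(sequences_info):
--     seqs = [d['sequence'] for d in sequences_info]
--     ranked = sorted(seqs, key=len, reverse=True)
--     longest_seq = ranked[0]
--     if len(sequences_info) > 1:
--         best_seq = next((s for s in ranked if 'X' not in s and s), "")
--         if best_seq:
--             return best_seq
--     clean_seq = longest_seq.replace('X', '')
--     return clean_seq if clean_seq else longest_seq
-- ===== Notes on version B (the rewrite author's own statement) =====
-- stated objective: alternative
-- what changed: Instead of A's max(..., key=len) plus a separate conditional scan, B stably sorts the extracted sequences by length in descending order once, takes ranked[0] as the longest and the first marker-free non-empty element of the ranked list as the best X-free sequence; stability makes ties resolve to the first occurrence exactly like A's strict comparisons.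
import Mathlib
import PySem

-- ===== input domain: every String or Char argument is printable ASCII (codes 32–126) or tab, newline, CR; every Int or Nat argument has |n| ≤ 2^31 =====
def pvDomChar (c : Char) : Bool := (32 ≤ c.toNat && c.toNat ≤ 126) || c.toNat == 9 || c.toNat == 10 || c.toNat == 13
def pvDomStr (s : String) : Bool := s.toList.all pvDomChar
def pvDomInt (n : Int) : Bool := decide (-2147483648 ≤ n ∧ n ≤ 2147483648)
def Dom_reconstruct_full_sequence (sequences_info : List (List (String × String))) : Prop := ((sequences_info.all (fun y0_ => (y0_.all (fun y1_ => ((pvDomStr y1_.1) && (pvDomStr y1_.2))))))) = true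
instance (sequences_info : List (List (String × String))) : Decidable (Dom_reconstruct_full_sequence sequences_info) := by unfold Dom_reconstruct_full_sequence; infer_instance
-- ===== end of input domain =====

-- B replaces A's max(..., key=len) call plus conditional scan by one stable reverse sort of the
-- sequences by length, reading off ranked[0] and the first marker-free non-empty hit; same return
-- value, different algorithm.

-- shared helper: seq_info['sequence'] (total via default ""; Pre_ guarantees the key is present)
def pvSeqOf (d : List (String × String)) : String :=
  (PySem.Dict.ofList d).getD "sequence" ""

-- ===== PORT A =====
-- A's X-free scan body: if 'X' not in seq and len(seq) > len(best_seq): best_seq = seq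
def pvStepA (best : String) (d : List (String × String)) : String :=
  if !PySem.Str.isIn "X" (pvSeqOf d) && decide (PySem.Str.len best < PySem.Str.len (pvSeqOf d))
  then pvSeqOf d else best

-- (Python's locals longest_seq/clean_seq/best_seq are written out inline.)
def reconstruct_full_sequence (sequences_info : List (List (String × String))) : String :=
  match PySem.List.max? sequences_info (fun x => PySem.Str.len (pvSeqOf x)) with
  | none => ""   -- Python raises ValueError on empty input; excluded by Pre_
  | some m =>
    if 1 < sequences_info.length then
      (if sequences_info.foldl pvStepA "" ≠ "" then sequences_info.foldl pvStepA ""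
       else if PySem.Str.replace (pvSeqOf m) "X" "" ≠ "" then PySem.Str.replace (pvSeqOf m) "X" ""
       else pvSeqOf m)
    else if PySem.Str.replace (pvSeqOf m) "X" "" ≠ "" then PySem.Str.replace (pvSeqOf m) "X" ""
    else pvSeqOf m

-- ===== PORT B =====
-- B's generator condition: 'X' not in s and s
def pvIsHit (s : String) : Bool := !PySem.Str.isIn "X" s && s != ""

-- ranked = sorted(seqs, key=len, reverse=True); locals written out inline
def reconstruct_full_sequence_alt (sequences_info : List (List (String × String))) : String :=
  match (PySem.List.sorted (sequences_info.map pvSeqOf) PySem.Str.len true).head? with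
  | none => ""   -- ranked[0]: Python raises IndexError on empty input; excluded by Pre_
  | some longest =>
    if 1 < sequences_info.length then
      (if ((PySem.List.sorted (sequences_info.map pvSeqOf) PySem.Str.len true).find? pvIsHit).getD "" ≠ ""
       then ((PySem.List.sorted (sequences_info.map pvSeqOf) PySem.Str.len true).find? pvIsHit).getD ""
       else if PySem.Str.replace longest "X" "" ≠ "" then PySem.Str.replace longest "X" ""
       else longest)
    else if PySem.Str.replace longest "X" "" ≠ "" then PySem.Str.replace longest "X" ""
    else longest

-- ===== PRECONDITION & SPEC =====
-- Pre_ excludes exactly the inputs where A raises: the empty list (ValueError from max)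
-- and any element missing the 'sequence' key (KeyError).
def Pre_reconstruct_full_sequence (sequences_info : List (List (String × String))) : Prop :=
  sequences_info ≠ [] ∧ ∀ d ∈ sequences_info, (PySem.Dict.ofList d).contains "sequence" = true
instance (sequences_info : List (List (String × String))) : Decidable (Pre_reconstruct_full_sequence sequences_info) := by unfold Pre_reconstruct_full_sequence; infer_instance

def pvWitness_reconstruct_full_sequence : (List (List (String × String))) :=
  [[("sequence", "ABX")], [("sequence", "AB")]]

def Spec_reconstruct_full_sequence (sequences_info : List (List (String × String))) (out : String) : Prop := out = reconstruct_full_sequence_alt sequences_info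
instance (sequences_info : List (List (String × String))) (out : String) : Decidable (Spec_reconstruct_full_sequence sequences_info out) := by unfold Spec_reconstruct_full_sequence; infer_instance

-- ===== CLAIM =====
def Claim_equal_reconstruct_full_sequence : Prop := ∀ (sequences_info : List (List (String × String))), Dom_reconstruct_full_sequence sequences_info → Pre_reconstruct_full_sequence sequences_info → Spec_reconstruct_full_sequence sequences_info (reconstruct_full_sequence sequences_info)

-- ===== LEMMAS AND PROOFS =====

-- the step of the first-wins "running maximal p-element" loop (proof helper)
def pvOptStep {α κ : Type} [LinearOrder κ] (key : α → κ) (p : α → Bool)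
    (acc : Option α) (x : α) : Option α :=
  match acc with
  | none => if p x then some x else none
  | some m => if p x && decide (key m < key x) then some x else some m

-- inserting into a descending list: the first p-element updates exactly like pvOptStep
theorem find?_insertBy {α κ : Type} [LinearOrder κ] (key : α → κ) (p : α → Bool)
    (x : α) (s : List α) (hs : s.Pairwise (fun a b => key b ≤ key a)) :
    (PySem.List.insertBy (fun a b => decide (key b < key a)) x s).find? p
      = pvOptStep key p (s.find? p) x := by
  induction s with
  | nil => simp [PySem.List.insertBy, pvOptStep, List.find?]
  | cons y ys ih =>
    rcases List.pairwise_cons.mp hs with ⟨hy, hys⟩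
    by_cases hlt : key y < key x
    · -- x goes in front
      have hins : PySem.List.insertBy (fun a b => decide (key b < key a)) x (y :: ys)
          = x :: y :: ys := by
        simp [PySem.List.insertBy, hlt]
      rw [hins]
      cases hpx : p x with
      | true =>
        rw [List.find?_cons_of_pos hpx]
        cases hfp : (y :: ys).find? p with
        | none => simp [pvOptStep, hpx]
        | some m =>
          have hkm : key m < key x := by
            have hmem := List.mem_of_find?_eq_some hfp
            rcases List.mem_cons.mp hmem with h | h
            · exact h ▸ hlt
            · exact lt_of_le_of_lt (hy m h) hlt
          simp [pvOptStep, hpx, hkm]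
      | false =>
        rw [List.find?_cons_of_neg (by simp [hpx])]
        cases hfp : (y :: ys).find? p with
        | none => simp [pvOptStep, hpx]
        | some m => simp [pvOptStep, hpx]
    · -- x goes past y
      have hins : PySem.List.insertBy (fun a b => decide (key b < key a)) x (y :: ys)
          = y :: PySem.List.insertBy (fun a b => decide (key b < key a)) x ys := by
        simp [PySem.List.insertBy, hlt]
      rw [hins]
      cases hpy : p y with
      | true =>
        rw [List.find?_cons_of_pos hpy, List.find?_cons_of_pos hpy]
        simp [pvOptStep, hlt]
      | false =>
        rw [List.find?_cons_of_neg (by simp [hpy]), List.find?_cons_of_neg (by simp [hpy])]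
        exact ih hys

-- first p-element of the stable reverse sort = first-wins running maximum over p-elements
theorem find?_sorted_rev {α κ : Type} [LinearOrder κ] (xs : List α) (key : α → κ) (p : α → Bool) :
    (PySem.List.sorted xs key true).find? p = xs.foldl (pvOptStep key p) none := by
  induction xs using List.reverseRecOn with
  | nil => rfl
  | append_singleton xs x ih =>
    rw [PySem.List.sorted_rev_eq_foldl_insertBy, List.foldl_append, List.foldl_cons, List.foldl_nil,
        ← PySem.List.sorted_rev_eq_foldl_insertBy,
        find?_insertBy key p x _ (PySem.List.sorted_pairwise_rev xs key),
        ih, List.foldl_append, List.foldl_cons, List.foldl_nil]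

-- head of the reverse sort is Python's max(..., key=...) (first maximal element)
theorem head_sorted_rev_eq_max? {α κ : Type} [LinearOrder κ] (xs : List α) (key : α → κ) :
    (PySem.List.sorted xs key true).head? = PySem.List.max? xs key := by
  have h1 : (PySem.List.sorted xs key true).find? (fun _ => true)
      = (PySem.List.sorted xs key true).head? := by
    cases PySem.List.sorted xs key true <;> simp [List.find?]
  rw [← h1, find?_sorted_rev]
  simp only [PySem.List.max?]
  apply PySem.List.foldl_congr_mem
  intro acc x _
  cases acc <;> simp [pvOptStep]

-- max? over a mapped list
theorem max?_map {α β κ : Type} [LinearOrder κ] (f : α → β) (xs : List α) (key : β → κ) :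
    PySem.List.max? (xs.map f) key = Option.map f (PySem.List.max? xs (fun x => key (f x))) := by
  simp only [PySem.List.max?, List.foldl_map]
  suffices h : ∀ (a : Option α),
      xs.foldl (fun acc x => match acc with
        | none => some (f x)
        | some m => if key m < key (f x) then some (f x) else some m) (Option.map f a)
      = Option.map f (xs.foldl (fun acc x => match acc with
        | none => some x
        | some m => if key (f m) < key (f x) then some x else some m) a) by
    exact h none
  intro a
  induction xs generalizing a with
  | nil => rfl
  | cons x t ih =>
    simp only [List.foldl_cons]
    cases a with
    | none => exact ih (some x)
    | some m =>
      by_cases h : key (f m) < key (f x)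
      · simp only [Option.map_some, if_pos h]; exact ih (some x)
      · simp only [Option.map_some, if_neg h]; exact ih (some m)

-- nonemptiness as a length fact
theorem pvLen_pos_iff (s : String) : 0 < PySem.Str.len s ↔ s ≠ "" := by
  rw [PySem.Str.len_eq]
  constructor
  · intro h he
    subst he
    simp at h
  · intro h
    have h1 : s.toList ≠ [] := fun hn => h (String.toList_eq_nil_iff.mp hn)
    have h2 : 0 < s.toList.length := List.length_pos_iff.mpr h1
    exact_mod_cast h2

-- A's best-X-free loop = first-wins running maximum with the nonempty-X-free predicate
theorem bestA_eq_optFold (seqs : List String) :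
    seqs.foldl (fun best s =>
        if !PySem.Str.isIn "X" s && decide (PySem.Str.len best < PySem.Str.len s) then s else best) ""
      = (seqs.foldl (pvOptStep PySem.Str.len pvIsHit) none).getD "" := by
  suffices h : ∀ (b : String) (acc : Option String),
      (acc = none ∧ b = "") ∨ (acc = some b ∧ b ≠ "") →
      seqs.foldl (fun best s =>
        if !PySem.Str.isIn "X" s && decide (PySem.Str.len best < PySem.Str.len s) then s else best) b
      = (seqs.foldl (pvOptStep PySem.Str.len pvIsHit) acc).getD "" by
    exact h "" none (Or.inl ⟨rfl, rfl⟩)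
  induction seqs with
  | nil =>
    intro b acc hinv
    rcases hinv with ⟨h1, h2⟩ | ⟨h1, h2⟩ <;> simp [h1, h2]
  | cons s t ih =>
    intro b acc hinv
    simp only [List.foldl_cons]
    rcases hinv with ⟨h1, h2⟩ | ⟨h1, h2⟩
    · subst h1; subst h2
      have hd : decide (PySem.Str.len "" < PySem.Str.len s) = (s != "") := by
        by_cases he : s = ""
        · subst he; decide
        · have h0 : PySem.Str.len "" < PySem.Str.len s := by
            have := (pvLen_pos_iff s).mpr he
            have hz : PySem.Str.len "" = 0 := by decide
            rw [hz]; exact this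
          have h1 : (s != "") = true := by simp [he]
          rw [h1, decide_eq_true h0]
      rw [hd]
      simp only [pvOptStep, pvIsHit]
      by_cases hc : (!PySem.Str.isIn "X" s && s != "") = true
      · rw [if_pos hc, if_pos hc]
        have hsne : s ≠ "" := by
          intro hn
          subst hn
          simp at hc
        exact ih s (some s) (Or.inr ⟨rfl, hsne⟩)
      · rw [if_neg hc, if_neg hc]
        exact ih "" none (Or.inl ⟨rfl, rfl⟩)
    · subst h1
      have hb0 : 0 < PySem.Str.len b := (pvLen_pos_iff b).mpr h2
      have hd : (pvIsHit s && decide (PySem.Str.len b < PySem.Str.len s))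
          = (!PySem.Str.isIn "X" s && decide (PySem.Str.len b < PySem.Str.len s)) := by
        by_cases hlt : PySem.Str.len b < PySem.Str.len s
        · have hsne : s ≠ "" := (pvLen_pos_iff s).mp (lt_trans hb0 hlt)
          have h1 : (s != "") = true := by simp [hsne]
          simp only [pvIsHit, h1, Bool.and_true]
        · have hdec : decide (PySem.Str.len b < PySem.Str.len s) = false := decide_eq_false hlt
          rw [hdec, Bool.and_false, Bool.and_false]
      simp only [pvOptStep]
      rw [hd]
      by_cases hc : (!PySem.Str.isIn "X" s && decide (PySem.Str.len b < PySem.Str.len s)) = true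
      · rw [if_pos hc, if_pos hc]
        have hlt : PySem.Str.len b < PySem.Str.len s := by
          by_contra hn
          rw [decide_eq_false hn, Bool.and_false] at hc
          exact Bool.false_ne_true hc
        have hsne : s ≠ "" := (pvLen_pos_iff s).mp (lt_trans hb0 hlt)
        exact ih s (some s) (Or.inr ⟨rfl, hsne⟩)
      · rw [if_neg hc, if_neg hc]
        exact ih b (some b) (Or.inr ⟨rfl, h2⟩)

-- ===== VERDICT =====
theorem reconstruct_full_sequence_spec : Claim_equal_reconstruct_full_sequence := by
  intro si _ _
  unfold Spec_reconstruct_full_sequence reconstruct_full_sequence reconstruct_full_sequence_alt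
  have hhead : (PySem.List.sorted (si.map pvSeqOf) PySem.Str.len true).head?
      = Option.map pvSeqOf (PySem.List.max? si (fun x => PySem.Str.len (pvSeqOf x))) := by
    rw [head_sorted_rev_eq_max?, max?_map]
  have hbest : ((PySem.List.sorted (si.map pvSeqOf) PySem.Str.len true).find? pvIsHit).getD ""
      = si.foldl pvStepA "" := by
    rw [find?_sorted_rev, ← bestA_eq_optFold (si.map pvSeqOf), List.foldl_map]
    rfl
  rw [hhead, hbest]
  cases hm : PySem.List.max? si (fun x => PySem.Str.len (pvSeqOf x)) <;> rfl
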